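-- pv_equiv track=rewrite | github.com/frankyaoxiao/diffamplification | scripts/evaluation/distribution_eval.py | extract_single_word
-- ===== SOURCE A (Python) =====
-- def extract_single_word(response: str) -> str:
--     """
--     Extract a single word from the response.
--     Handles various response formats and extracts the most relevant word.
--
--     Args:
--         response: The generated response
--
--     Returns:
--         Single word extracted from response
--     """
--     # Clean the response
--     response = response.strip().lower()
--
--     # Remove common punctuation and extra text
--     response = response.replace('\n', ' ').replace('\t', ' ')
--
--     # Split into words and filter out empty strings
--     words = [word.strip() for word in response.split() if word.strip()]
--
--     if not words:
--         return "no_response"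
--
--     # Look for the first meaningful word (skip common prefixes and template tokens)
--     skip_words = {
--         'the', 'a', 'an', 'and', 'or', 'but', 'in', 'on', 'at', 'to', 'for', 'of', 'with', 'by',
--         'assistant', 'user', 'system', 'human', 'bot', 'ai', 'model', 'llm', 'chat', 'conversation'
--     }
--
--     for word in words:
--         # Remove punctuation from word
--         clean_word = ''.join(c for c in word if c.isalnum())
--         if clean_word and clean_word not in skip_words and len(clean_word) > 1:
--             return clean_word
--
--     # If no meaningful word found, return the first non-skip word
--     for word in words:
--         clean_word = ''.join(c for c in word if c.isalnum())
--         if clean_word and clean_word not in skip_words: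
--             return clean_word
--
--     # If still no meaningful word found, return the first word
--     return words[0] if words else "no_response"
-- ===== SOURCE B (Python) =====
-- def extract_single_word(response: str) -> str:
--     """Single-pass variant: one scan with a recorded fallback replaces A's two scans."""
--     response = response.strip().lower()
--     response = response.replace('\n', ' ').replace('\t', ' ')
--     words = [word.strip() for word in response.split() if word.strip()]
--
--     if not words:
--         return "no_response"
--
--     skip_words = {
--         'the', 'a', 'an', 'and', 'or', 'but', 'in', 'on', 'at', 'to', 'for', 'of', 'with', 'by',
--         'assistant', 'user', 'system', 'human', 'bot', 'ai', 'model', 'llm', 'chat', 'conversation'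
--     }
--
--     fallback = None
--     for word in words:
--         clean_word = ''.join(c for c in word if c.isalnum())
--         if clean_word and clean_word not in skip_words:
--             if len(clean_word) > 1:
--                 return clean_word
--             if fallback is None:
--                 fallback = clean_word
--     return fallback if fallback is not None else words[0]
-- ===== Notes on version B (the rewrite author's own statement) =====
-- stated objective: simpler
-- what changed: A's three sequential scans over the word list (len>1 pass, then non-skip pass, then words[0]) are merged into one loop that returns a long clean word immediately and records the first short non-skip clean word as a fallback.
import Mathlib
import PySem

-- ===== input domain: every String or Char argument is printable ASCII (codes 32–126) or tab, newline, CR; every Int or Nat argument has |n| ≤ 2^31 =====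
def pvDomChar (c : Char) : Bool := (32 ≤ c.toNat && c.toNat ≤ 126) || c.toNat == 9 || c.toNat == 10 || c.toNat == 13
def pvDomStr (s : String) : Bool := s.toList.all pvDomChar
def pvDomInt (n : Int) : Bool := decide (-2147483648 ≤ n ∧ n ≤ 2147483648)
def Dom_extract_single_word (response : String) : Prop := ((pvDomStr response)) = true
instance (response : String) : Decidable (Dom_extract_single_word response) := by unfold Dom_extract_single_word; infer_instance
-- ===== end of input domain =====

-- B merges A's three sequential scans into one loop with a recorded fallback; objective: simpler.

-- shared helpers: both Pythons contain these identical lines (preprocessing and the skip set)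
def pvSkipWords : List String :=
  ["the", "a", "an", "and", "or", "but", "in", "on", "at", "to", "for", "of", "with", "by",
   "assistant", "user", "system", "human", "bot", "ai", "model", "llm", "chat", "conversation"]

def pvWords (response : String) : List String :=
  let r1 := PySem.Str.lower (PySem.Str.strip response)
  let r2 := PySem.Str.replace (PySem.Str.replace r1 "\n" " ") "\t" " "
  ((PySem.Str.split₀ r2).map PySem.Str.strip).filter (fun w => decide (w ≠ ""))

-- ''.join(c for c in word if c.isalnum())
def pvClean (w : String) : List Char := w.toList.filter PySem.Chars.isalnum

-- ===== PORT A =====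
-- first loop: first clean word that is nonempty, not a skip word, and longer than 1
def pvScanLong : List String → Option String
  | [] => none
  | w :: ws =>
    if pvClean w ≠ [] ∧ ¬ pvSkipWords.contains (String.ofList (pvClean w)) ∧ (pvClean w).length > 1 then
      some (String.ofList (pvClean w))
    else pvScanLong ws

-- second loop: first clean word that is nonempty and not a skip word
def pvScanAny : List String → Option String
  | [] => none
  | w :: ws =>
    if pvClean w ≠ [] ∧ ¬ pvSkipWords.contains (String.ofList (pvClean w)) then
      some (String.ofList (pvClean w))
    else pvScanAny ws

def extract_single_word (response : String) : String :=
  let words := pvWords response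
  if words = [] then "no_response"
  else
    match pvScanLong words with
    | some c => c
    | none =>
      match pvScanAny words with
      | some c => c
      | none => words.headD "no_response"

-- ===== PORT B =====
-- single pass: return a long clean word at once, record the first short one as fallback
def pvScanFB : List String → Option String → Option String
  | [], fb => fb
  | w :: ws, fb =>
    if pvClean w ≠ [] ∧ ¬ pvSkipWords.contains (String.ofList (pvClean w)) then
      if (pvClean w).length > 1 then some (String.ofList (pvClean w))
      else pvScanFB ws (if fb = none then some (String.ofList (pvClean w)) else fb)
    else pvScanFB ws fb

def extract_single_word_alt (response : String) : String :=
  let words := pvWords response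
  if words = [] then "no_response"
  else
    match pvScanFB words none with
    | some c => c
    | none => words.headD "no_response"

-- ===== PRECONDITION & SPEC =====
def Spec_extract_single_word (response : String) (out : String) : Prop := out = extract_single_word_alt response
instance (response : String) (out : String) : Decidable (Spec_extract_single_word response out) := by unfold Spec_extract_single_word; infer_instance

-- ===== CLAIM (what is proved, stated in full; the proofs are below) =====
def Claim_equal_extract_single_word : Prop := ∀ (response : String), Dom_extract_single_word response → Spec_extract_single_word response (extract_single_word response)

-- ===== LEMMAS AND PROOFS =====

theorem pvScanFB_eq (words : List String) (fb : Option String) :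
    pvScanFB words fb =
      match pvScanLong words with
      | some c => some c
      | none => fb.orElse (fun _ => pvScanAny words) := by
  induction words generalizing fb with
  | nil => cases fb <;> simp [pvScanFB, pvScanLong, pvScanAny, Option.orElse]
  | cons w ws ih =>
    simp only [pvScanFB, pvScanLong, pvScanAny]
    by_cases hA : pvClean w ≠ [] ∧ ¬ pvSkipWords.contains (String.ofList (pvClean w))
    · rw [if_pos hA]
      by_cases hL : (pvClean w).length > 1
      · rw [if_pos hL, if_pos ⟨hA.1, hA.2, hL⟩]
      · have hnl : ¬ (pvClean w ≠ [] ∧ ¬ pvSkipWords.contains (String.ofList (pvClean w)) ∧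
            (pvClean w).length > 1) := fun h => hL h.2.2
        rw [if_neg hL, ih, if_neg hnl, if_pos hA]
        cases hS : pvScanLong ws <;> cases hfb : fb <;> simp [Option.orElse]
    · have hnl : ¬ (pvClean w ≠ [] ∧ ¬ pvSkipWords.contains (String.ofList (pvClean w)) ∧
          (pvClean w).length > 1) := fun h => hA ⟨h.1, h.2.1⟩
      rw [if_neg hA, ih, if_neg hnl, if_neg hA]

theorem extract_single_word_spec : Claim_equal_extract_single_word := by
  intro response _
  unfold Spec_extract_single_word extract_single_word extract_single_word_alt
  by_cases hw : pvWords response = []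
  · simp [hw]
  · simp only [if_neg hw, pvScanFB_eq]
    cases hL : pvScanLong (pvWords response) <;> cases hA : pvScanAny (pvWords response) <;>
      simp [Option.orElse]
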